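-- pv_equiv track=rewrite | github.com/kainkordian/HashCodeHackathon | Pizza/kordian.py | get_possible_slices
-- ===== SOURCE A (Python) =====
-- def get_possible_slices(rows, columns, lows, maxArea):
-- 	list_of_tuples = []
-- 	for i in range(1,maxArea+1):
-- 		if i <= rows:
-- 			for j in range(1,maxArea+1):
-- 				if j <= columns and i*j <= maxArea and i*j >= lows*2:
-- 						list_of_tuples.append((i,j))
-- 	list_of_tuples = sorted(list_of_tuples, key = lambda x : x[0] * x[1], reverse = True)
-- 	return list_of_tuples
-- ===== SOURCE B (Python) =====
-- def get_possible_slices(rows, columns, lows, maxArea):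
--     # Generate pairs already in descending-area order: no sort needed.
--     res = []
--     lb = max(lows * 2, 1)
--     for area in range(maxArea, lb - 1, -1):
--         for i in range(1, min(rows, area) + 1):
--             if area % i == 0:
--                 j = area // i
--                 if j <= columns:
--                     res.append((i, j))
--     return res
-- ===== Notes on version B (the rewrite author's own statement) =====
-- stated objective: faster
-- what changed: B emits the pairs directly in descending-area order by scanning areas from maxArea down to max(2*lows,1) and enumerating each area's divisors i ascending (j = area//i), eliminating A's collect-all-pairs-then-stable-sort pass entirely.
import Mathlib
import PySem

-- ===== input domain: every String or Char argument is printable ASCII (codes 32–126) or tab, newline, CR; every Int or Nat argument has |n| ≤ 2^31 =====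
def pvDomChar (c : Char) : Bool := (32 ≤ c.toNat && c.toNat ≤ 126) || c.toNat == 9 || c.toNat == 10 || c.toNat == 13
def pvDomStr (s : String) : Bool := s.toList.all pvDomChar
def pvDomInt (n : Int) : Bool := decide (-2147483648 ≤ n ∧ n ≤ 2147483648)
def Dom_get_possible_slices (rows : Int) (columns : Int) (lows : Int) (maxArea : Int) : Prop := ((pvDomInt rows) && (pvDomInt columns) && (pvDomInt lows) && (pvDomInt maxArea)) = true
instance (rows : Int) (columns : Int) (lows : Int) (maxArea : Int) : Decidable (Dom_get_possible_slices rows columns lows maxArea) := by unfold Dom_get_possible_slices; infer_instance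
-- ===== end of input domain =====

-- B replaces A's collect-all-pairs-then-stable-sort with a sort-free scan that emits
-- the pairs directly in descending-area order (divisor enumeration per area); the
-- timing run measured B faster at every size.

-- ===== PORT A =====
def get_possible_slices (rows : Int) (columns : Int) (lows : Int) (maxArea : Int) : List (Int × Int) :=
  let list_of_tuples : List (Int × Int) :=
    (PySem.List.pyRange 1 (maxArea + 1)).foldl (fun acc i =>
      if i ≤ rows then
        (PySem.List.pyRange 1 (maxArea + 1)).foldl (fun acc2 j =>
          if j ≤ columns ∧ i * j ≤ maxArea ∧ i * j ≥ lows * 2 then acc2 ++ [(i, j)] else acc2) acc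
      else acc) []
  PySem.List.sorted list_of_tuples (fun x => x.1 * x.2) true

-- ===== PORT B =====
def get_possible_slices_alt (rows : Int) (columns : Int) (lows : Int) (maxArea : Int) : List (Int × Int) :=
  let lb : Int := max (lows * 2) 1
  (PySem.List.pyRange maxArea (lb - 1) (-1)).foldl (fun acc area =>
    (PySem.List.pyRange 1 (min rows area + 1)).foldl (fun acc2 i =>
      if PySem.Int.mod area i = 0 then
        let j := PySem.Int.floordiv area i
        if j ≤ columns then acc2 ++ [(i, j)] else acc2
      else acc2) acc) []

-- ===== PRECONDITION & SPEC =====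
def Spec_get_possible_slices (rows : Int) (columns : Int) (lows : Int) (maxArea : Int) (out : List (Int × Int)) : Prop := out = get_possible_slices_alt rows columns lows maxArea
instance (rows : Int) (columns : Int) (lows : Int) (maxArea : Int) (out : List (Int × Int)) : Decidable (Spec_get_possible_slices rows columns lows maxArea out) := by unfold Spec_get_possible_slices; infer_instance

-- ===== CLAIM (what is proved, stated in full; the proofs are below) =====
def Claim_equal_get_possible_slices : Prop := ∀ (rows : Int) (columns : Int) (lows : Int) (maxArea : Int), Dom_get_possible_slices rows columns lows maxArea → Spec_get_possible_slices rows columns lows maxArea (get_possible_slices rows columns lows maxArea)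

-- ===== LEMMAS AND PROOFS =====

def pvKey (x : Int × Int) : Int := x.1 * x.2

def pvAList (rows columns lows maxArea : Int) : List (Int × Int) :=
  (PySem.List.pyRange 1 (maxArea + 1)).flatMap (fun i =>
    if i ≤ rows then
      ((PySem.List.pyRange 1 (maxArea + 1)).filter
        (fun j => decide (j ≤ columns ∧ i * j ≤ maxArea ∧ i * j ≥ lows * 2))).map (fun j => (i, j))
    else [])

def pvH (rows columns : Int) (k : Int) : List (Int × Int) :=
  ((PySem.List.pyRange 1 (min rows k + 1)).filter
    (fun i => decide (PySem.Int.mod k i = 0 ∧ PySem.Int.floordiv k i ≤ columns))).map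
    (fun i => (i, PySem.Int.floordiv k i))

def pvBuckets (ks : List Int) (xs : List (Int × Int)) : List (Int × Int) :=
  ks.flatMap (fun k => xs.filter (fun x => decide (pvKey x = k)))

theorem pv_pyRange_neg_one (a b : Int) :
    PySem.List.pyRange a b (-1) =
      (List.range (if b < a then (a - b).toNat else 0)).map (fun (k : Nat) => a - (k : Int)) := by
  show (if (-1 : Int) = 0 then [] else _) = _
  rw [if_neg (by norm_num)]
  dsimp only
  rw [if_neg (by norm_num : ¬ ((0:Int) < -1))]
  have h3 : (a - b + -(-1) - 1) / (-(-1)) = a - b := by norm_num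
  rw [h3]
  exact List.map_congr_left (fun k _ => by ring)

theorem pv_mem_pyRange_neg_one (a b x : Int) :
    x ∈ PySem.List.pyRange a b (-1) ↔ b < x ∧ x ≤ a := by
  rw [pv_pyRange_neg_one]
  simp only [List.mem_map, List.mem_range]
  constructor
  · rintro ⟨k, hk, rfl⟩
    split at hk <;> omega
  · rintro ⟨h1, h2⟩
    refine ⟨(a - x).toNat, by split <;> omega, by omega⟩

theorem pv_pyRange_neg_one_pairwise (a b : Int) :
    (PySem.List.pyRange a b (-1)).Pairwise (fun p q => q < p) := by
  rw [pv_pyRange_neg_one]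
  refine List.Pairwise.map _ (fun p q (h : p < q) => by omega) ?_
  exact List.pairwise_lt_range

theorem pv_nodup_pyRange_one (a b : Int) : (PySem.List.pyRange a b).Nodup := by
  rw [PySem.List.pyRange_of_pos a b (by norm_num : (0:Int) < 1)]
  exact List.nodup_range.map (fun p q h => by omega)

theorem pv_filter_eq_singleton (a b x : Int) (h1 : a ≤ x) (h2 : x < b) :
    (PySem.List.pyRange a b).filter (fun j => decide (j = x)) = [x] := by
  have h : ((PySem.List.pyRange a b).filter (fun j => j == x)) = List.replicate ((PySem.List.pyRange a b).count x) x := List.filter_beq x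
  have hc : (PySem.List.pyRange a b).count x = 1 :=
    List.count_eq_one_of_mem (pv_nodup_pyRange_one a b) (PySem.List.mem_pyRange_one.2 ⟨h1, h2⟩)
  rw [hc] at h
  simpa using h

theorem pv_pyRange_one_nil (a b : Int) (h : b ≤ a) : PySem.List.pyRange a b = [] := by
  rw [PySem.List.pyRange_of_pos a b (by norm_num : (0:Int) < 1)]
  rw [if_neg (by omega)]
  simp

theorem pv_map_filter_eq_flatMap (l : List Int) (p : Int → Bool) (f : Int → Int × Int) :
    (l.filter p).map f = l.flatMap (fun i => if p i then [f i] else []) := by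
  induction l with
  | nil => simp
  | cons a l ih =>
    by_cases h : p a <;> simp [h, ih]

theorem pvA_eq (rows columns lows maxArea : Int) :
    get_possible_slices rows columns lows maxArea =
      PySem.List.sorted (pvAList rows columns lows maxArea) pvKey true := by
  unfold get_possible_slices pvAList pvKey
  rw [PySem.List.foldl_congr_mem _ _
      (fun acc i => acc ++ (if i ≤ rows then
        ((PySem.List.pyRange 1 (maxArea + 1)).filter
          (fun j => decide (j ≤ columns ∧ i * j ≤ maxArea ∧ i * j ≥ lows * 2))).map (fun j => (i, j))
        else [])) _
      (by
        intro acc i _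
        dsimp only
        split_ifs with hi
        · exact PySem.List.foldl_append_ite (fun j => j ≤ columns ∧ i * j ≤ maxArea ∧ i * j ≥ lows * 2) (fun j => (i, j)) _ acc
        · simp)]
  rw [PySem.List.foldl_append_eq_flatMap]
  simp

theorem pvB_eq (rows columns lows maxArea : Int) :
    get_possible_slices_alt rows columns lows maxArea =
      (PySem.List.pyRange maxArea (max (lows * 2) 1 - 1) (-1)).flatMap (pvH rows columns) := by
  unfold get_possible_slices_alt pvH
  rw [PySem.List.foldl_congr_mem _ _ (fun acc area => acc ++
      ((PySem.List.pyRange 1 (min rows area + 1)).filter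
        (fun i => decide (PySem.Int.mod area i = 0 ∧ PySem.Int.floordiv area i ≤ columns))).map
        (fun i => (i, PySem.Int.floordiv area i))) _
      (by
        intro acc area _
        dsimp only
        rw [PySem.List.foldl_congr_mem _ _ (fun acc2 i =>
            if PySem.Int.mod area i = 0 ∧ PySem.Int.floordiv area i ≤ columns
            then acc2 ++ [(i, PySem.Int.floordiv area i)] else acc2) _
          (by
            intro acc2 i _
            dsimp only
            split_ifs <;> simp_all)]
        exact PySem.List.foldl_append_ite
          (fun i => PySem.Int.mod area i = 0 ∧ PySem.Int.floordiv area i ≤ columns)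
          (fun i => (i, PySem.Int.floordiv area i)) _ acc)]
  rw [PySem.List.foldl_append_eq_flatMap]
  simp

theorem pv_insertBy_append (before : Int × Int → Int × Int → Bool) (x : Int × Int)
    (as bs : List (Int × Int)) (h : ∀ y ∈ as, before x y = false) :
    PySem.List.insertBy before x (as ++ bs) = as ++ PySem.List.insertBy before x bs := by
  induction as with
  | nil => simp
  | cons a as ih =>
    have ha : before x a = false := h a (by simp)
    simp [PySem.List.insertBy, ha, ih (fun y hy => h y (by simp [hy]))]

theorem pv_insertBy_all (before : Int × Int → Int × Int → Bool) (x : Int × Int)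
    (bs : List (Int × Int)) (h : ∀ y ∈ bs, before x y = true) :
    PySem.List.insertBy before x bs = x :: bs := by
  cases bs with
  | nil => simp [PySem.List.insertBy]
  | cons b bs => simp [PySem.List.insertBy, h b (by simp)]

theorem pv_bucket_insert (ks : List Int) (x : Int × Int) (xs : List (Int × Int))
    (hks : ks.Pairwise (fun p q => q < p)) (hx : pvKey x ∈ ks) :
    PySem.List.insertBy (fun a b => decide (pvKey b < pvKey a)) x (pvBuckets ks xs) =
      pvBuckets ks (xs ++ [x]) := by
  induction ks with
  | nil => simp at hx
  | cons k ks ih =>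
    have hlt : ∀ k' ∈ ks, k' < k := fun k' hk' => (List.pairwise_cons.1 hks).1 k' hk'
    have hks' : ks.Pairwise (fun p q => q < p) := (List.pairwise_cons.1 hks).2
    by_cases hxk : pvKey x = k
    · -- x belongs in the first bucket
      have h1 : ∀ y ∈ xs.filter (fun z => decide (pvKey z = k)),
          (fun a b => decide (pvKey b < pvKey a)) x y = false := by
        intro y hy
        have := (List.mem_filter.1 hy).2
        simp at this ⊢
        omega
      have h2 : ∀ y ∈ pvBuckets ks xs, (fun a b => decide (pvKey b < pvKey a)) x y = true := by
        intro y hy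
        obtain ⟨k', hk', hy'⟩ := List.mem_flatMap.1 hy
        have : pvKey y = k' := by simpa using (List.mem_filter.1 hy').2
        have := hlt k' hk'
        simp
        omega
      show PySem.List.insertBy _ x (xs.filter (fun z => decide (pvKey z = k)) ++ pvBuckets ks xs) = _
      rw [pv_insertBy_append _ _ _ _ h1, pv_insertBy_all _ _ _ h2]
      show _ = (xs ++ [x]).filter (fun z => decide (pvKey z = k)) ++ pvBuckets ks (xs ++ [x])
      rw [List.filter_append]
      have hsing : [x].filter (fun z => decide (pvKey z = k)) = [x] := by simp [hxk]
      rw [hsing]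
      have htail : pvBuckets ks (xs ++ [x]) = pvBuckets ks xs := by
        unfold pvBuckets
        refine List.flatMap_congr (fun k' hk' => ?_)
        rw [List.filter_append]
        have : [x].filter (fun z => decide (pvKey z = k')) = [] := by
          have := hlt k' hk'
          simp
          omega
        simp [this]
      rw [htail]
      simp
    · have hx' : pvKey x ∈ ks := by
        rcases List.mem_cons.1 hx with h | h
        · exact absurd h hxk
        · exact h
      have hxlt : pvKey x < k := hlt _ hx'
      have h1 : ∀ y ∈ xs.filter (fun z => decide (pvKey z = k)),
          (fun a b => decide (pvKey b < pvKey a)) x y = false := by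
        intro y hy
        have := (List.mem_filter.1 hy).2
        simp at this ⊢
        omega
      show PySem.List.insertBy _ x (xs.filter (fun z => decide (pvKey z = k)) ++ pvBuckets ks xs) = _
      rw [pv_insertBy_append _ _ _ _ h1, ih hks' hx']
      show _ = (xs ++ [x]).filter (fun z => decide (pvKey z = k)) ++ pvBuckets ks (xs ++ [x])
      rw [List.filter_append]
      have : [x].filter (fun z => decide (pvKey z = k)) = [] := by simp [hxk]
      simp [this]

theorem pv_sorted_eq_buckets (ks : List Int) (xs : List (Int × Int))
    (hks : ks.Pairwise (fun p q => q < p)) (hxs : ∀ x ∈ xs, pvKey x ∈ ks) :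
    PySem.List.sorted xs pvKey true = pvBuckets ks xs := by
  rw [PySem.List.sorted_rev_eq_foldl_insertBy]
  have main : ∀ (ts seen : List (Int × Int)), (∀ x ∈ ts, pvKey x ∈ ks) →
      ts.foldl (fun acc x => PySem.List.insertBy (fun a b => decide (pvKey b < pvKey a)) x acc)
        (pvBuckets ks seen) = pvBuckets ks (seen ++ ts) := by
    intro ts
    induction ts with
    | nil => intro seen _; simp
    | cons t ts ih =>
      intro seen hmem
      simp only [List.foldl_cons]
      rw [pv_bucket_insert ks t seen hks (hmem t (by simp)),
        ih (seen ++ [t]) (fun x hx => hmem x (by simp [hx]))]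
      simp
  have h0 : pvBuckets ks [] = [] := by simp [pvBuckets]
  have := main xs [] hxs
  rw [h0] at this
  simpa using this

theorem pv_keys_mem (rows columns lows maxArea : Int) (x : Int × Int)
    (hx : x ∈ pvAList rows columns lows maxArea) :
    pvKey x ∈ PySem.List.pyRange maxArea (max (lows * 2) 1 - 1) (-1) := by
  unfold pvAList at hx
  obtain ⟨i, hi, hx'⟩ := List.mem_flatMap.1 hx
  rw [PySem.List.mem_pyRange_one] at hi
  split_ifs at hx' with hrow
  · obtain ⟨j, hj, rfl⟩ := List.mem_map.1 hx'
    obtain ⟨hj1, hj2⟩ := List.mem_filter.1 hj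
    rw [PySem.List.mem_pyRange_one] at hj1
    simp only [decide_eq_true_eq] at hj2
    obtain ⟨hc, hm, hl⟩ := hj2
    have hpos : 1 ≤ i * j := by nlinarith [hi.1, hj1.1]
    rw [pv_mem_pyRange_neg_one]
    unfold pvKey
    simp only
    omega
  · simp at hx'

theorem pv_bucket_eq_H (rows columns lows maxArea k : Int)
    (h1 : max (lows * 2) 1 ≤ k) (h2 : k ≤ maxArea) :
    (pvAList rows columns lows maxArea).filter (fun x => decide (pvKey x = k)) =
      pvH rows columns k := by
  have hk1 : (1:Int) ≤ k := by omega
  have hkl : lows * 2 ≤ k := by omega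
  unfold pvAList pvH
  rw [List.filter_flatMap, pv_map_filter_eq_flatMap]
  -- per-i core: for 1 ≤ i ≤ min rows k, the filtered j-list is the divisor singleton
  have core : ∀ i : Int, 1 ≤ i → i ≤ rows → i ≤ k →
      (((PySem.List.pyRange 1 (maxArea + 1)).filter
          (fun j => decide (j ≤ columns ∧ i * j ≤ maxArea ∧ i * j ≥ lows * 2))).map
        (fun j => (i, j))).filter (fun x => decide (pvKey x = k)) =
      (if decide (PySem.Int.mod k i = 0 ∧ PySem.Int.floordiv k i ≤ columns) = true
        then [(i, PySem.Int.floordiv k i)] else []) := by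
    intro i hi1 hirows hik
    have hipos : (0:Int) < i := by omega
    have hfd : PySem.Int.floordiv k i = k / i := PySem.Int.floordiv_eq_ediv_of_pos hipos
    rw [List.filter_map, List.filter_filter]
    by_cases hdvd : i ∣ k
    · have hk : i * (k / i) = k := Int.mul_ediv_cancel' hdvd
      set j0 := k / i with hj0
      have hj0pos : 1 ≤ j0 := by nlinarith
      have hj0le : j0 ≤ k := by nlinarith
      have hmod : PySem.Int.mod k i = 0 := (PySem.Int.mod_eq_zero_iff_dvd k i).2 hdvd
      have hcong : ∀ j ∈ PySem.List.pyRange 1 (maxArea + 1),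
          ((fun a => ((fun x => decide (pvKey x = k)) ∘ fun j => (i, j)) a &&
            decide (a ≤ columns ∧ i * a ≤ maxArea ∧ i * a ≥ lows * 2)) j) =
          decide (j = j0 ∧ j0 ≤ columns) := by
        intro j hj
        rw [PySem.List.mem_pyRange_one] at hj
        simp only [pvKey, Function.comp, ← Bool.decide_and, decide_eq_decide]
        constructor
        · rintro ⟨hij, hc, _, _⟩
          have : j = j0 := by
            have : i * j = i * j0 := by rw [hij, hk]
            exact mul_left_cancel₀ (by omega) this
          exact ⟨this, this ▸ hc⟩
        · rintro ⟨rfl, hc⟩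
          exact ⟨hk, hc, by omega, by omega⟩
      rw [List.filter_congr hcong]
      by_cases hc : j0 ≤ columns
      · have : (fun j => decide (j = j0 ∧ j0 ≤ columns)) = (fun j => decide (j = j0)) := by
          funext j; simp [hc]
        rw [this, pv_filter_eq_singleton 1 (maxArea + 1) j0 (by omega) (by omega)]
        rw [if_pos (by simp [hmod, hfd, hc])]
        simp [hfd]
      · rw [List.filter_eq_nil_iff.2 (by intro j _; simp [hc])]
        rw [if_neg (by simp [hfd, hc])]
        simp
    · have hmod : ¬ PySem.Int.mod k i = 0 := fun h => hdvd ((PySem.Int.mod_eq_zero_iff_dvd k i).1 h)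
      rw [if_neg (by simp [hmod])]
      rw [List.filter_eq_nil_iff.2 ?_]
      · simp
      · intro j _
        simp only [pvKey, Function.comp, Bool.and_eq_true, decide_eq_true_eq, not_and]
        intro hij
        exact (hdvd ⟨j, hij.symm⟩).elim
  by_cases hm : 1 ≤ min rows k
  · -- split A's i-range at min rows k + 1
    have hsplit : ∀ (G : Int → List (Int × Int)),
        (PySem.List.pyRange 1 (maxArea + 1)).flatMap G =
          (PySem.List.pyRange 1 (min rows k + 1)).flatMap G ++
          (PySem.List.pyRange (min rows k + 1) (maxArea + 1)).flatMap G := by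
      intro G
      rw [PySem.List.pyRange_one_append 1 (min rows k + 1) (maxArea + 1) (by omega) (by omega),
        List.flatMap_append]
    rw [hsplit]
    have htail : (PySem.List.pyRange (min rows k + 1) (maxArea + 1)).flatMap
        (fun i => (if i ≤ rows then
          ((PySem.List.pyRange 1 (maxArea + 1)).filter
            (fun j => decide (j ≤ columns ∧ i * j ≤ maxArea ∧ i * j ≥ lows * 2))).map
            (fun j => (i, j))
          else []).filter (fun x => decide (pvKey x = k))) = [] := by
      rw [List.flatMap_eq_nil_iff]
      intro i hi
      rw [PySem.List.mem_pyRange_one] at hi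
      split_ifs with hrow
      · have hik : k < i := by omega
        rw [List.filter_map, List.filter_eq_nil_iff.2 ?_]
        · simp
        · intro j hj
          obtain ⟨hj1, -⟩ := List.mem_filter.1 hj
          rw [PySem.List.mem_pyRange_one] at hj1
          simp only [Function.comp, pvKey, decide_eq_true_eq]
          intro hij
          nlinarith [hj1.1]
      · simp
    rw [htail, List.append_nil]
    refine List.flatMap_congr (fun i hi => ?_)
    rw [PySem.List.mem_pyRange_one] at hi
    rw [if_pos (by omega)]
    exact core i hi.1 (by omega) (by omega)
  · -- min rows k < 1: both sides are empty (rows < 1, so no i passes the row guard)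
    have hrows : rows < 1 := by omega
    rw [pv_pyRange_one_nil 1 (min rows k + 1) (by omega)]
    simp only [List.flatMap_nil]
    rw [List.flatMap_eq_nil_iff]
    intro i hi
    rw [PySem.List.mem_pyRange_one] at hi
    rw [if_neg (by omega)]
    simp

-- ===== VERDICT (by name: the statement is the Claim_ definition above) =====
theorem get_possible_slices_spec : Claim_equal_get_possible_slices := by
  intro rows columns lows maxArea _
  unfold Spec_get_possible_slices
  rw [pvA_eq, pvB_eq,
    pv_sorted_eq_buckets (PySem.List.pyRange maxArea (max (lows * 2) 1 - 1) (-1)) _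
      (pv_pyRange_neg_one_pairwise _ _) (pv_keys_mem rows columns lows maxArea)]
  unfold pvBuckets
  refine List.flatMap_congr (fun k hk => ?_)
  rw [pv_mem_pyRange_neg_one] at hk
  exact pv_bucket_eq_H rows columns lows maxArea k (by omega) (by omega)
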